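-- pv_equiv track=rewrite | github.com/Redvarik/pythonProject2 | Строки/19.py | remove_duplicate_chars
-- ===== SOURCE A (Python) =====
-- def remove_duplicate_chars(s):
--     result = ""
--     i = 0
--     n = len(s)
--
--     while i < n:
--         if i + 1 < n and s[i] == s[i + 1]:
--             current_char = s[i]
--             while i < n and s[i] == current_char:
--                 i += 1
--         else:
--             result += s[i]
--             i += 1
--
--     return result
-- ===== SOURCE B (Python) =====
-- def remove_duplicate_chars(s):
--     prevs = [None] + list(s)
--     nexts = list(s[1:]) + [None]
--     return ''.join(c for p, c, q in zip(prevs, s, nexts) if p != c and q != c)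
-- ===== Notes on version B (the rewrite author's own statement) =====
-- stated objective: alternative
-- what changed: Replaces A's index-driven run-skipping nested while loops by a stateless per-position rule: zip the string with its left- and right-shifted copies and keep a character iff it differs from both neighbors; no run is ever tracked or skipped.
import Mathlib
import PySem

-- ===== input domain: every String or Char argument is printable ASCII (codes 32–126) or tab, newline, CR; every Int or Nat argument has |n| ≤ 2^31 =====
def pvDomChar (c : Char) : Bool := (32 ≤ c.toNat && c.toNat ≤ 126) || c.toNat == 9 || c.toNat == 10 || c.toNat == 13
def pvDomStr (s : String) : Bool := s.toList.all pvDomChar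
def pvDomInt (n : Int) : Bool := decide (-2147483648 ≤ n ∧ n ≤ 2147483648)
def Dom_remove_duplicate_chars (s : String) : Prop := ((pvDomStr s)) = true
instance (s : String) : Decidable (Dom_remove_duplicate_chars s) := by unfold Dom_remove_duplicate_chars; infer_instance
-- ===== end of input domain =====

-- B replaces A's run-skipping nested loops by a stateless neighbor test (zip with shifted copies, keep a char iff it differs from both neighbors); alternative decomposition, A = B proved total.

-- ===== PORT A =====
-- outer while loop of A over the remaining characters; the inner while is the dropWhile
def pvLoopA : List Char → List Char
  | [] => []
  | c :: rest =>
    if rest.head? = some c then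
      pvLoopA (rest.dropWhile (· == c))
    else
      c :: pvLoopA rest
termination_by l => l.length
decreasing_by
  all_goals simp only [List.length_cons]
  · exact Nat.lt_succ_of_le (List.length_dropWhile_le _ _)
  · omega

def remove_duplicate_chars (s : String) : String :=
  String.mk (pvLoopA s.toList)

-- ===== PORT B =====
-- prevs = [None] + list(s); nexts = list(s[1:]) + [None]; keep c from zip(prevs, s, nexts) iff p != c and q != c
def remove_duplicate_chars_alt (s : String) : String :=
  let l := s.toList
  let prevs : List (Option Char) := none :: l.map some
  let nexts : List (Option Char) := (l.drop 1).map some ++ [none]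
  String.mk
    (((prevs.zip (l.zip nexts)).filter
        (fun x => (x.1 != some x.2.1) && (x.2.2 != some x.2.1))).map (fun x => x.2.1))

-- ===== PRECONDITION & SPEC =====
def Spec_remove_duplicate_chars (s : String) (out : String) : Prop := out = remove_duplicate_chars_alt s
instance (s : String) (out : String) : Decidable (Spec_remove_duplicate_chars s out) := by unfold Spec_remove_duplicate_chars; infer_instance

-- ===== CLAIM =====
def Claim_equal_remove_duplicate_chars : Prop := ∀ (s : String), Dom_remove_duplicate_chars s → Spec_remove_duplicate_chars s (remove_duplicate_chars s)

-- ===== LEMMAS AND PROOFS =====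
-- B's zip-filter-map comprehension, parameterized by the left neighbor of the first char
def pvZF (p : Option Char) (l : List Char) : List Char :=
  (((p :: l.map some).zip (l.zip ((l.drop 1).map some ++ [none]))).filter
      (fun x => (x.1 != some x.2.1) && (x.2.2 != some x.2.1))).map (fun x => x.2.1)

theorem pvZF_step (p : Option Char) (c : Char) (t : List Char) :
    pvZF p (c :: t) =
      (if p ≠ some c ∧ t.head? ≠ some c then [c] else []) ++ pvZF (some c) t := by
  cases t with
  | nil =>
    simp only [pvZF, List.map, List.drop, List.zip, List.zipWith, List.nil_append,
      List.head?_nil]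
    by_cases h : p = some c <;> simp [h]
  | cons d t' =>
    simp only [pvZF, List.map_cons, List.drop_succ_cons, List.drop_zero, List.cons_append,
      List.zip_cons_cons, List.head?_cons]
    by_cases h : p = some c <;> by_cases h2 : (some d : Option Char) = some c <;>
      simp [h, h2]

theorem pvZF_drop (c : Char) (t : List Char) :
    pvZF (some c) (c :: t) = pvZF (some c) t := by
  rw [pvZF_step]; simp

theorem pvZF_dropWhile (c : Char) (t : List Char) :
    pvZF (some c) t = pvZF (some c) (t.dropWhile (· == c)) := by
  induction t with
  | nil => rfl
  | cons d t' ih =>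
    by_cases h : d = c
    · subst h; rw [List.dropWhile_cons_of_pos (by simp), pvZF_drop]; exact ih
    · rw [List.dropWhile_cons_of_neg (by simp [h])]

theorem pvLoopA_eq_pvZF : ∀ (l : List Char) (p : Option Char),
    (∀ d, p = some d → l.head? ≠ some d) →
    pvLoopA l = pvZF p l
  | [], p, _ => by simp [pvLoopA, pvZF]
  | c :: t, p, hp => by
    rw [pvLoopA, pvZF_step]
    have hpc : p ≠ some c := by
      intro he
      exact hp c he (by simp)
    by_cases h : t.head? = some c
    · rw [if_pos h, if_neg (by simp [h])]
      have hh : (t.dropWhile (· == c)).head? ≠ some c := by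
        intro hc
        have := List.head?_dropWhile_not (p := (· == c)) (l := t)
        rw [hc] at this
        simp at this
      rw [List.nil_append, pvZF_dropWhile c t]
      exact pvLoopA_eq_pvZF (t.dropWhile (· == c)) (some c)
        (fun d hd => by cases hd; exact hh)
    · rw [if_neg h, if_pos ⟨hpc, h⟩, List.singleton_append]
      exact congrArg (c :: ·) (pvLoopA_eq_pvZF t (some c)
        (fun d hd => by cases hd; exact h))
termination_by l => l.length
decreasing_by
  all_goals simp only [List.length_cons]
  · exact Nat.lt_succ_of_le (List.length_dropWhile_le _ _)
  · omega

-- ===== VERDICT =====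
theorem remove_duplicate_chars_spec : Claim_equal_remove_duplicate_chars := by
  intro s _
  unfold Spec_remove_duplicate_chars remove_duplicate_chars remove_duplicate_chars_alt
  rw [pvLoopA_eq_pvZF s.toList none (by intro d hd; simp at hd)]
  rfl
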